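-- pv_equiv track=rewrite | github.com/CAST-Extend/com.castsoftware.uc.simulatorgenerator | utils/excel_format.py | get_hrefid
-- ===== SOURCE A (Python) =====
-- def get_hrefid(href, separator='/'):
--     if href == None or separator == None:
--         return None
--     _id = ""
--     hrefsplit = href.split('/')
--     for elem in hrefsplit:
--         # the last element is the id
--         _id = elem
--     return _id
-- ===== SOURCE B (Python) =====
-- def get_hrefid(href, separator='/'):
--     # B: find the last '/' with rfind and slice the suffix; no split list, no loop.
--     if href is None or separator is None:
--         return None
--     idx = href.rfind('/')
--     return href[idx + 1:]
-- ===== Notes on version B (the rewrite author's own statement) =====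
-- stated objective: idiomatic
-- what changed: Replaces splitting on the slash plus a loop that overwrites an accumulator down to the last element by a single backward search (rfind) for the last slash and a slice of the suffix, building no intermediate list.
import Mathlib
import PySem

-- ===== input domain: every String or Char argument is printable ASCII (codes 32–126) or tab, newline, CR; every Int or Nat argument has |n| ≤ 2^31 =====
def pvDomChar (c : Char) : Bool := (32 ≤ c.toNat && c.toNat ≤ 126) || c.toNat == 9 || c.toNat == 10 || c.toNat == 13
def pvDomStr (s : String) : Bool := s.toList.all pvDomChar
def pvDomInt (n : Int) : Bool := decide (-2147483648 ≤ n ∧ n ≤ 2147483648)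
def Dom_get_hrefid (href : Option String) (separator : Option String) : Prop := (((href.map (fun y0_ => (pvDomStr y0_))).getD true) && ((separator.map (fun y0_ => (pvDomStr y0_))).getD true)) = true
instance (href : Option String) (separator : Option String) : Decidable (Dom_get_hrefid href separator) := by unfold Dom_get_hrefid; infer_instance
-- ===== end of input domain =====

-- B replaces splitting on the slash and looping to the last element by a backward search plus slice (idiomatic; same O(n) cost).


-- ===== PORT A =====
-- href.split('/') ported as PySem.Chars.splitOn on the code points (sep ≠ ""), mapped back to String
def get_hrefid (href : Option String) (separator : Option String) : Option String :=
  match href, separator with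
  | some h, some _ =>
    let hrefsplit : List String := (PySem.Chars.splitOn h.toList ['/']).map String.ofList
    some (hrefsplit.foldl (fun _id elem => elem) "")
  | _, _ => none

-- ===== PORT B =====
def get_hrefid_alt (href : Option String) (separator : Option String) : Option String :=
  if href.isNone || separator.isNone then none
  else
    match href with
    | some h =>
      let idx : Int := PySem.Str.rfind h "/"
      some (PySem.Str.slice h (some (idx + 1)) none)
    | none => none

-- ===== PRECONDITION & SPEC =====
def Spec_get_hrefid (href : Option String) (separator : Option String) (out : Option String) : Prop := out = get_hrefid_alt href separator
instance (href : Option String) (separator : Option String) (out : Option String) : Decidable (Spec_get_hrefid href separator out) := by unfold Spec_get_hrefid; infer_instance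

-- ===== CLAIM (what is proved, stated in full; the proofs are below) =====
def Claim_equal_get_hrefid : Prop := ∀ (href : Option String) (separator : Option String), Dom_get_hrefid href separator → Spec_get_hrefid href separator (get_hrefid href separator)

-- ===== LEMMAS AND PROOFS =====

-- the suffix of l after its last '/', with an accumulator for the current segment (reversed)
def pvLastSeg : List Char → List Char → List Char
  | [], cur => cur.reverse
  | c :: rest, cur => if c = '/' then pvLastSeg rest [] else pvLastSeg rest (c :: cur)

theorem prefix_slash (l : List Char) : (['/'].isPrefixOf l = true) ↔ l.head? = some '/' := by
  cases l with
  | nil => simp [List.isPrefixOf]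
  | cons c t =>
    simp [List.isPrefixOf]
    exact eq_comm

theorem go_getLast (fuel : Nat) : ∀ (l cur : List Char) (accs : List (List Char)),
    l.length ≤ fuel →
    (PySem.Chars.splitOn.go ['/'] fuel l cur accs).getLast? = some (pvLastSeg l cur) := by
  induction fuel with
  | zero =>
    intro l cur accs h
    have hl : l = [] := List.eq_nil_of_length_eq_zero (Nat.le_zero.mp h)
    subst hl
    simp [PySem.Chars.splitOn.go, pvLastSeg]
  | succ fuel ih =>
    intro l cur accs h
    cases l with
    | nil => simp [PySem.Chars.splitOn.go, pvLastSeg]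
    | cons c rest =>
      by_cases hc : c = '/'
      · rw [PySem.Chars.splitOn.go]
        have hpc : ['/'].isPrefixOf (c :: rest) = true := by
          rw [prefix_slash]
          simp [hc]
        simp only [if_pos hpc, List.length_singleton, List.drop_one, List.tail_cons]
        rw [ih rest [] _ (by simpa using Nat.le_of_succ_le_succ (by simpa using h))]
        simp [pvLastSeg, hc]
      · rw [PySem.Chars.splitOn.go]
        have hpc : ¬ (['/'].isPrefixOf (c :: rest) = true) := by
          rw [prefix_slash]
          simp [hc]
        simp only [if_neg hpc]
        rw [ih rest (c :: cur) _ (by simpa using Nat.le_of_succ_le_succ (by simpa using h))]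
        simp [pvLastSeg, hc]

theorem foldl_snd {α : Type} (xs : List α) (a : α) :
    xs.foldl (fun _ e => e) a = xs.getLastD a := by
  induction xs generalizing a with
  | nil => rfl
  | cons c t ih =>
    simp only [List.foldl, ih]
    cases t with
    | nil => rfl
    | cons d t' =>
      rcases e : (d :: t').getLast? with _ | x
      · simp [List.getLast?_eq_none_iff] at e
      · simp [e]

theorem lastSeg_no (l : List Char) (h : '/' ∉ l) : ∀ cur, pvLastSeg l cur = cur.reverse ++ l := by
  induction l with
  | nil => intro cur; simp [pvLastSeg]
  | cons c t ih =>
    intro cur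
    have hc : c ≠ '/' := fun hh => h (by simp [hh])
    have ht : '/' ∉ t := fun hh => h (by simp [hh])
    simp [pvLastSeg, hc, ih ht]

theorem lastSeg_app (a b : List Char) : ∀ cur, pvLastSeg (a ++ '/' :: b) cur = pvLastSeg b [] := by
  induction a with
  | nil => intro cur; simp [pvLastSeg]
  | cons c t ih =>
    intro cur
    by_cases hc : c = '/' <;> simp [pvLastSeg, hc, ih]

theorem rfind_go_ge (s : List Char) (j : Nat) : -1 ≤ PySem.Chars.rfind.go s ['/'] j := by
  induction j with
  | zero => simp [PySem.Chars.rfind.go]; split <;> omega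
  | succ j ih => simp [PySem.Chars.rfind.go]; split <;> [omega; exact ih]

theorem rfind_go_none (s : List Char) (j : Nat)
    (h : ∀ m, m ≤ j → s[m]? ≠ some '/') : PySem.Chars.rfind.go s ['/'] j = -1 := by
  induction j with
  | zero =>
    have h0 : ¬ (['/'].isPrefixOf s = true) := by
      rw [prefix_slash, List.head?_eq_getElem?]
      exact h 0 (Nat.le_refl 0)
    rw [PySem.Chars.rfind.go]
    simp [h0]
  | succ j ih =>
    have h1 : ¬ (['/'].isPrefixOf (s.drop (j + 1)) = true) := by
      rw [prefix_slash, List.head?_drop]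
      exact h (j + 1) (Nat.le_refl _)
    rw [PySem.Chars.rfind.go]
    simp only [if_neg h1]
    exact ih (fun m hm => h m (Nat.le_trans hm (Nat.le_succ j)))

theorem rfind_go_at (s : List Char) (k : Nat) (hk : s[k]? = some '/')
    (hafter : ∀ m, k < m → s[m]? ≠ some '/') :
    ∀ j, k ≤ j → PySem.Chars.rfind.go s ['/'] j = (k : Int) := by
  intro j
  induction j with
  | zero =>
    intro hj
    have hk0 : k = 0 := Nat.le_zero.mp hj
    subst hk0
    have h0 : ['/'].isPrefixOf s = true := by
      rw [prefix_slash, List.head?_eq_getElem?]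
      exact hk
    rw [PySem.Chars.rfind.go]
    simp [h0]
  | succ j ih =>
    intro hj
    by_cases hkj : k = j + 1
    · subst hkj
      have h1 : ['/'].isPrefixOf (s.drop (j + 1)) = true := by
        rw [prefix_slash, List.head?_drop]
        exact hk
      rw [PySem.Chars.rfind.go]
      simp [h1]
    · have hkle : k ≤ j := by omega
      have h1 : ¬ (['/'].isPrefixOf (s.drop (j + 1)) = true) := by
        rw [prefix_slash, List.head?_drop]
        exact hafter (j + 1) (by omega)
      rw [PySem.Chars.rfind.go]
      simp only [if_neg h1]
      exact ih hkle

theorem exists_split (s : List Char) (h : '/' ∈ s) :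
    ∃ a b, s = a ++ '/' :: b ∧ '/' ∉ b := by
  induction s with
  | nil => simp at h
  | cons c t ih =>
    by_cases ht : '/' ∈ t
    · obtain ⟨a, b, rfl, hb⟩ := ih ht
      exact ⟨c :: a, b, rfl, hb⟩
    · have hc : c = '/' := by
        rcases List.mem_cons.mp h with h' | h'
        · exact h'.symm
        · exact absurd h' ht
      exact ⟨[], t, by simp [hc], ht⟩

theorem drop_rfind (s : List Char) :
    s.drop ((PySem.Chars.rfind s ['/'] + 1).toNat) = pvLastSeg s [] := by
  by_cases hmem : '/' ∈ s
  · obtain ⟨a, b, rfl, hb⟩ := exists_split s hmem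
    have hk : (a ++ '/' :: b)[a.length]? = some '/' := by
      rw [List.getElem?_append_right (Nat.le_refl _)]
      simp
    have hafter : ∀ m, a.length < m → (a ++ '/' :: b)[m]? ≠ some '/' := by
      intro m hm he
      rw [List.getElem?_append_right (Nat.le_of_lt hm)] at he
      rcases Nat.exists_eq_add_of_lt hm with ⟨d, hd⟩
      subst hd
      rw [show a.length + d + 1 - a.length = d + 1 by omega] at he
      simp only [List.getElem?_cons_succ] at he
      exact hb (List.mem_of_getElem? he)
    have hgo : PySem.Chars.rfind (a ++ '/' :: b) ['/'] = (a.length : Int) := by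
      unfold PySem.Chars.rfind
      exact rfind_go_at _ _ hk hafter _ (by simp only [List.length_append, List.length_cons]; omega)
    rw [hgo, lastSeg_app, lastSeg_no b hb]
    have hlen : ((a.length : Int) + 1).toNat = (a ++ ['/']).length := by
      simp only [List.length_append, List.length_singleton]
      omega
    have hsplit : a ++ '/' :: b = (a ++ ['/']) ++ b := by simp
    rw [hlen, hsplit, List.drop_left]
    simp
  · have hnone : ∀ m, m ≤ s.length → s[m]? ≠ some '/' := by
      intro m _ he
      exact hmem (List.mem_of_getElem? he)
    have hgo : PySem.Chars.rfind s ['/'] = -1 := by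
      unfold PySem.Chars.rfind
      exact rfind_go_none _ _ hnone
    rw [hgo, lastSeg_no s hmem]
    simp

-- ===== VERDICT (by name: the statement is the Claim_ definition above) =====
theorem get_hrefid_spec : Claim_equal_get_hrefid := by
  intro href separator _
  unfold Spec_get_hrefid
  match href, separator with
  | none, _ => cases separator <;> rfl
  | some h, none => rfl
  | some h, some sp =>
    show some _ = get_hrefid_alt (some h) (some sp)
    rw [show get_hrefid_alt (some h) (some sp)
        = some (PySem.Str.slice h (some (PySem.Str.rfind h "/" + 1)) none) from rfl]
    have hsep : "/".toList = ['/'] := rfl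
    have hge : -1 ≤ PySem.Chars.rfind h.toList ['/'] := by
      unfold PySem.Chars.rfind
      exact rfind_go_ge _ _
    have hlast : ((PySem.Chars.splitOn h.toList ['/']).map String.ofList).getLast?
        = some (String.ofList (pvLastSeg h.toList [])) := by
      rw [List.getLast?_map, PySem.Chars.splitOn,
        go_getLast _ _ _ _ (Nat.le_succ _)]
      rfl
    congr 1
    rw [foldl_snd]
    simp only [List.getLastD_eq_getLast?, hlast, Option.getD_some]
    rw [PySem.Str.slice]
    rw [show PySem.Str.rfind h "/" = PySem.Chars.rfind h.toList ['/'] by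
      rw [PySem.Str.rfind_eq, hsep]]
    rw [PySem.Chars.slice_eq_listSlice,
      PySem.List.slice_from _ (by omega : (0:Int) ≤ PySem.Chars.rfind h.toList ['/'] + 1),
      drop_rfind]
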